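-- pv_equiv track=rewrite | github.com/GlenboLake/DailyProgrammer | C224E_square_spirals.py | number_at
-- ===== SOURCE A (Python) =====
-- def number_at(size, x, y):
--     # New values based on center being (0, 0)
--     x = x - 1 - size // 2
--     y = y - 1 - size // 2
--
--     ring = max(list(map(abs, [x, y])))
--     ring_max = (2 * ring + 1)**2
--     dist_before_turn = 2 * ring
--     counter = 0
--     dirs = [(-1, 0), (0, -1), (1, 0), (0, 1), (0, 0)]
--     d = 0
--     at_x, at_y = ring, ring
--     value = ring_max
--     while (x, y) != (at_x, at_y):
--         at_x += dirs[d][0]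
--         at_y += dirs[d][1]
--         value -= 1
--         counter += 1
--         if counter % dist_before_turn == 0:
--             d += 1
--     return value
-- ===== SOURCE B (Python) =====
-- def number_at(size, x, y):
--     # Closed form: ring, then arithmetic offset along the ring's perimeter.
--     cx = x - 1 - size // 2
--     cy = y - 1 - size // 2
--     r = max(abs(cx), abs(cy))
--     m = (2 * r + 1) ** 2  # value at the ring's start corner (r, r)
--     if cy == r and cx < r:      # top side, walking left from the start corner
--         steps = r - cx
--     elif cx == -r and cy < r:   # left side, walking down
--         steps = 3 * r - cy
--     elif cy == -r:              # bottom side, walking right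
--         steps = 5 * r + cx
--     elif cx == r and cy < r:    # right side, walking up
--         steps = 7 * r + cy
--     else:                       # the start corner itself
--         steps = 0
--     return m - steps
-- ===== Notes on version B (the rewrite author's own statement) =====
-- stated objective: faster
-- what changed: Replaces A's step-by-step walk around the spiral ring (up to 8*ring iterations) with a closed-form case split that computes the perimeter offset arithmetically from the side the point lies on.
import Mathlib
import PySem

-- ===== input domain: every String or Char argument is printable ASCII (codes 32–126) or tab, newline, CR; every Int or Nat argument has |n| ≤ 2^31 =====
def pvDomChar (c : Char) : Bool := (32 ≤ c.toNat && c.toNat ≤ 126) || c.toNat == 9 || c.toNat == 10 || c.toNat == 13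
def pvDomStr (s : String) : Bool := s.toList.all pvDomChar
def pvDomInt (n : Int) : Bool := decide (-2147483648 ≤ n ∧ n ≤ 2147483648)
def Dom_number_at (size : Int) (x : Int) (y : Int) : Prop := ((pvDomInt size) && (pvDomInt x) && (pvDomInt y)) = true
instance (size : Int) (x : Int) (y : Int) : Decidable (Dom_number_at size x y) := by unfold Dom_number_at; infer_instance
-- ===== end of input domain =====

-- B replaces A's step-by-step walk around the spiral ring with a closed-form
-- perimeter-offset case split (objective: faster, asymptotically).

-- ===== PORT A =====
-- the dirs list of A
def dirsA : List (Int × Int) := [(-1, 0), (0, -1), (1, 0), (0, 1), (0, 0)]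

-- A's while loop, with enough fuel supplied at the call site (the walk takes
-- at most 8*ring steps; fuel exhaustion returns the current value, matching
-- the loop's exit).  dirs[d] is looked up with default (0,0); Python's d
-- stays within 0..4 whenever the loop body runs.
def loopA (x y dbt : Int) : Nat → Int → Int → Int → Int → Int → Int
  | 0, _, _, _, _, value => value
  | fuel + 1, at_x, at_y, counter, d, value =>
    if x = at_x ∧ y = at_y then value
    else
      loopA x y dbt fuel
        (at_x + (dirsA.getD d.toNat (0, 0)).1)
        (at_y + (dirsA.getD d.toNat (0, 0)).2)
        (counter + 1)
        (if PySem.Int.mod (counter + 1) dbt = 0 then d + 1 else d)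
        (value - 1)

def number_at (size : Int) (x : Int) (y : Int) : Int :=
  let x' := x - 1 - PySem.Int.floordiv size 2
  let y' := y - 1 - PySem.Int.floordiv size 2
  let ring := max |x'| |y'|
  let ring_max := (2 * ring + 1) ^ 2
  let dist_before_turn := 2 * ring
  loopA x' y' dist_before_turn (8 * ring).toNat ring ring 0 0 ring_max

-- ===== PORT B =====
def number_at_alt (size : Int) (x : Int) (y : Int) : Int :=
  let cx := x - 1 - PySem.Int.floordiv size 2
  let cy := y - 1 - PySem.Int.floordiv size 2
  let r := max |cx| |cy|
  let m := (2 * r + 1) ^ 2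
  let steps :=
    if cy = r ∧ cx < r then r - cx
    else if cx = -r ∧ cy < r then 3 * r - cy
    else if cy = -r then 5 * r + cx
    else if cx = r ∧ cy < r then 7 * r + cy
    else 0
  m - steps

-- ===== PRECONDITION & SPEC =====
def Spec_number_at (size : Int) (x : Int) (y : Int) (out : Int) : Prop := out = number_at_alt size x y
instance (size : Int) (x : Int) (y : Int) (out : Int) : Decidable (Spec_number_at size x y out) := by unfold Spec_number_at; infer_instance

-- ===== CLAIM (what is proved, stated in full; the proofs are below) =====
def Claim_equal_number_at : Prop := ∀ (size : Int) (x : Int) (y : Int), Dom_number_at size x y → Spec_number_at size x y (number_at size x y)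

-- ===== LEMMAS AND PROOFS =====

-- position on ring r after c steps of A's walk (start corner is (r, r))
def posr (r c : Int) : Int × Int :=
  if c ≤ 2 * r then (r - c, r)
  else if c ≤ 4 * r then (-r, 3 * r - c)
  else if c ≤ 6 * r then (c - 5 * r, -r)
  else (r, c - 7 * r)

-- A's direction index after counter has reached c
def dIdx (r c : Int) : Int :=
  if c < 2 * r then 0
  else if c < 4 * r then 1
  else if c < 6 * r then 2
  else if c < 8 * r then 3
  else 4

lemma posr_inj (r : Int) (hr : 0 < r) (a b : Int)
    (ha0 : 0 ≤ a) (ha1 : a ≤ 8 * r - 1) (hb0 : 0 ≤ b) (hb1 : b ≤ 8 * r - 1)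
    (h : posr r a = posr r b) : a = b := by
  unfold posr at h
  split_ifs at h <;> rw [Prod.mk.injEq] at h <;> omega

lemma mult_char (r k : Int) (hr : 0 < r) (h1 : 1 ≤ k) (h2 : k ≤ 8 * r - 1) :
    k % (2 * r) = 0 ↔ (k = 2 * r ∨ k = 4 * r ∨ k = 6 * r) := by
  constructor
  · intro h
    obtain ⟨q, hq⟩ : (2 * r) ∣ k := Int.dvd_of_emod_eq_zero h
    have hq1 : 1 ≤ q := by nlinarith
    have hq3 : q ≤ 3 := by nlinarith
    interval_cases q <;> omega
  · rintro (h | h | h)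
    · rw [h]; exact Int.emod_self
    · have : (2 * r) ∣ k := ⟨2, by omega⟩
      exact Int.emod_eq_zero_of_dvd this
    · have : (2 * r) ∣ k := ⟨3, by omega⟩
      exact Int.emod_eq_zero_of_dvd this

lemma dupdate (r c : Int) (hr : 0 < r) (h0 : 0 ≤ c) (h2 : c ≤ 8 * r - 2) :
    (if PySem.Int.mod (c + 1) (2 * r) = 0 then dIdx r c + 1 else dIdx r c) = dIdx r (c + 1) := by
  rw [PySem.Int.mod_eq_emod_of_pos (show (0:Int) < 2 * r by omega)]
  have hchar := mult_char r (c + 1) hr (by omega) (by omega)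
  by_cases hm : (c + 1) % (2 * r) = 0
  · rw [if_pos hm]
    rcases hchar.mp hm with h | h | h <;> unfold dIdx <;> split_ifs <;> omega
  · rw [if_neg hm]
    have hne : ¬(c + 1 = 2 * r ∨ c + 1 = 4 * r ∨ c + 1 = 6 * r) := fun h => hm (hchar.mpr h)
    push_neg at hne
    unfold dIdx; split_ifs <;> omega

lemma stepBoth (r c : Int) (hr : 0 < r) (h0 : 0 ≤ c) (h2 : c ≤ 8 * r - 2) :
    (posr r c).1 + (dirsA.getD (dIdx r c).toNat (0, 0)).1 = (posr r (c + 1)).1 ∧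
    (posr r c).2 + (dirsA.getD (dIdx r c).toNat (0, 0)).2 = (posr r (c + 1)).2 := by
  rcases show c < 2 * r ∨ (2 * r ≤ c ∧ c < 4 * r) ∨ (4 * r ≤ c ∧ c < 6 * r) ∨ (6 * r ≤ c ∧ c < 8 * r) from by omega with h | h | h | h
  · have hd : dIdx r c = 0 := by unfold dIdx; split_ifs <;> omega
    rw [hd]; unfold posr; simp only [dirsA, Int.toNat_zero, List.getD]
    split_ifs <;> simp <;> omega
  · have hd : dIdx r c = 1 := by unfold dIdx; split_ifs <;> omega
    rw [hd]; unfold posr; simp only [dirsA, Int.toNat_one, List.getD]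
    split_ifs <;> simp <;> omega
  · have hd : dIdx r c = 2 := by unfold dIdx; split_ifs <;> omega
    rw [hd]; unfold posr
    simp only [dirsA, show ((2:Int)).toNat = 2 from rfl, List.getD]
    split_ifs <;> simp <;> omega
  · have hd : dIdx r c = 3 := by unfold dIdx; split_ifs <;> omega
    rw [hd]; unfold posr
    simp only [dirsA, show ((3:Int)).toNat = 3 from rfl, List.getD]
    split_ifs <;> simp <;> omega

lemma loopA_inv (x y r s : Int) (hr : 0 < r) (hs1 : 1 ≤ s) (hs2 : s ≤ 8 * r - 1)
    (hx : x = (posr r s).1) (hy : y = (posr r s).2) :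
    ∀ (fuel : Nat) (c : Int), 0 ≤ c → c ≤ s → (s - c).toNat ≤ fuel →
    loopA x y (2 * r) fuel (posr r c).1 (posr r c).2 c (dIdx r c) ((2 * r + 1) ^ 2 - c)
      = (2 * r + 1) ^ 2 - s := by
  intro fuel
  induction fuel with
  | zero =>
    intro c h0 h1 h2
    have : c = s := by omega
    subst this
    rfl
  | succ n ih =>
    intro c h0 h1 h2
    by_cases hcs : c = s
    · subst hcs
      rw [loopA, if_pos ⟨hx, hy⟩]
    · have hlt : c < s := lt_of_le_of_ne h1 hcs
      have hguard : ¬(x = (posr r c).1 ∧ y = (posr r c).2) := by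
        rintro ⟨h1', h2'⟩
        exact hcs (posr_inj r hr c s (by omega) (by omega) (by omega) (by omega)
          (Prod.ext (by omega) (by omega)))
      rw [loopA, if_neg hguard, (stepBoth r c hr h0 (by omega)).1, (stepBoth r c hr h0 (by omega)).2,
        dupdate r c hr h0 (by omega),
        show (2 * r + 1) ^ 2 - c - 1 = (2 * r + 1) ^ 2 - (c + 1) from by ring]
      exact ih (c + 1) (by omega) (by omega) (by omega)

lemma core (r cx cy : Int) (h0 : 0 ≤ r) (hx : |cx| ≤ r) (hy : |cy| ≤ r)
    (hm : |cx| = r ∨ |cy| = r) :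
    loopA cx cy (2 * r) (8 * r).toNat r r 0 0 ((2 * r + 1) ^ 2)
      = (2 * r + 1) ^ 2 -
        (if cy = r ∧ cx < r then r - cx
         else if cx = -r ∧ cy < r then 3 * r - cy
         else if cy = -r then 5 * r + cx
         else if cx = r ∧ cy < r then 7 * r + cy
         else 0) := by
  rw [abs_le] at hx hy
  rw [abs_eq h0, abs_eq h0] at hm
  rcases show r = 0 ∨ 0 < r from by omega with hr | hr
  · subst hr
    have hcx : cx = 0 := by omega
    have hcy : cy = 0 := by omega
    subst hcx; subst hcy
    rfl
  · have p0 : posr r 0 = (r, r) := by unfold posr; rw [if_pos (by omega)]; simp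
    have d0 : dIdx r 0 = 0 := by unfold dIdx; rw [if_pos (by omega)]
    have hfuel : (8 * r).toNat = ((8 * r).toNat - 1) + 1 := by omega
    by_cases hstart : cx = r ∧ cy = r
    · rw [hfuel, loopA, if_pos hstart]
      split_ifs <;> omega
    · -- apply the invariant with start counter 0 and target step count s
      have apply_inv : ∀ s : Int, 1 ≤ s → s ≤ 8 * r - 1 →
          cx = (posr r s).1 → cy = (posr r s).2 →
          loopA cx cy (2 * r) (8 * r).toNat r r 0 0 ((2 * r + 1) ^ 2) = (2 * r + 1) ^ 2 - s := by
        intro s hs1 hs2 hxs hys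
        have key := loopA_inv cx cy r s hr hs1 hs2 hxs hys (8 * r).toNat 0 le_rfl
          (by omega) (by omega)
        simp only [p0, d0, sub_zero] at key
        exact key
      split_ifs with h1 h2 h3 h4
      · exact apply_inv (r - cx) (by omega) (by omega)
          (by unfold posr; rw [if_pos (by omega)]; simp <;> omega)
          (by unfold posr; rw [if_pos (by omega)]; simp <;> omega)
      · exact apply_inv (3 * r - cy) (by omega) (by omega)
          (by unfold posr; rw [if_neg (by omega), if_pos (by omega)]; simp; omega)
          (by unfold posr; rw [if_neg (by omega), if_pos (by omega)]; simp <;> omega)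
      · have hcx : -r < cx := by
          rcases show cx = -r ∨ -r < cx from by omega with h | h
          · exact absurd ⟨h, by omega⟩ h2
          · exact h
        exact apply_inv (5 * r + cx) (by omega) (by omega)
          (by unfold posr; rw [if_neg (by omega), if_neg (by omega), if_pos (by omega)]; simp <;> omega)
          (by unfold posr; rw [if_neg (by omega), if_neg (by omega), if_pos (by omega)]; simp <;> omega)
      · exact apply_inv (7 * r + cy) (by omega) (by omega)
          (by unfold posr; rw [if_neg (by omega), if_neg (by omega), if_neg (by omega)]; simp <;> omega)
          (by unfold posr; rw [if_neg (by omega), if_neg (by omega), if_neg (by omega)]; simp <;> omega)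
      · exfalso
        rcases hm with h | h <;> rcases h with h | h <;> omega

-- ===== VERDICT (by name: the statement is the Claim_ definition above) =====
theorem number_at_spec : Claim_equal_number_at := by
  intro size x y _
  unfold Spec_number_at number_at number_at_alt
  exact core (max |x - 1 - PySem.Int.floordiv size 2| |y - 1 - PySem.Int.floordiv size 2|)
    (x - 1 - PySem.Int.floordiv size 2) (y - 1 - PySem.Int.floordiv size 2)
    (le_max_of_le_left (abs_nonneg _)) (le_max_left _ _) (le_max_right _ _)
    ((max_choice _ _).imp Eq.symm Eq.symm)
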